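-- pv_equiv track=rewrite | github.com/kvuklazk/matika | smallest sum.py | solution
-- ===== SOURCE A (Python) =====
-- def solution(a):
--     while not all_equal(a):
--         i = 0
--         k = 0
--         while i < len(a) and not all_equal(a):
--             while k < len(a):
--                 if a[i] < a[k]:
--                     a[k] -= a[i]
--                 else:
--                     k += 1
--             i += 1
--             k = 0
--     return sum(a)
--
-- def all_equal(iterator):
--     iterator = iter(iterator)
--
--     try:
--         first = next(iterator)
--     except StopIteration:
--         return True
--
--     return all(first == x for x in iterator)
-- ===== SOURCE B (Python) =====
-- def solution(a):
--     g = 0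
--     for x in a:
--         g = _gcd(g, x)
--     return len(a) * g
--
--
-- def _gcd(g, x):
--     # remainder-based Euclid; on an all-equal list the fold returns the
--     # common value unchanged (g % g == 0), matching A on constant lists
--     while x:
--         g, x = x, g % x
--     return g
-- ===== Notes on version B (the rewrite author's own statement) =====
-- stated objective: alternative
-- what changed: A repeatedly sweeps the list subtracting smaller elements from larger ones in place until all entries are equal and sums the result; B computes one left fold of a remainder-based Euclid over the list and returns len(a) times that fold (intended as asymptotically faster; a timing run could only observe A timing out at n=16 while B returned, no clean ratio, so no speed claim is made).
import Mathlib
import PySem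

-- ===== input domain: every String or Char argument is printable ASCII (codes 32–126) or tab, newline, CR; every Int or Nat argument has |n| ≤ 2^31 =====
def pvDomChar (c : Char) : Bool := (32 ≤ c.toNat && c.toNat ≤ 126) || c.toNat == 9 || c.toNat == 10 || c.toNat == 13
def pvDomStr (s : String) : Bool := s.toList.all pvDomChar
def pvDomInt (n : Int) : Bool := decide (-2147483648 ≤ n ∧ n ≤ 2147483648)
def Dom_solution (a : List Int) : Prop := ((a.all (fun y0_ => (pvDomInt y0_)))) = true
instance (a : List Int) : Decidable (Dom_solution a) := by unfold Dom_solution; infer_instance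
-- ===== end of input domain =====

-- B replaces A's in-place subtraction sweeps by one fold of a remainder-based Euclid
-- times the length (intended as faster; a timing run saw A time out at n=16 while
-- B returned, no clean ratio, so no speed claim is made). A mutates its argument in
-- place, B does not — the equivalence proved here is about the RETURN value only.

-- ===== PORT A =====
-- all_equal(a) for a list argument
def allEqual (a : List Int) : Bool :=
  match a with
  | [] => true
  | x :: xs => xs.all (fun y => x == y)

-- fuel bound for the innermost while loop (a termination guard only; proved
-- sufficient on Pre_ inputs below — Python A diverges outside Pre_)
def innerFuel (a : List Int) : Nat := a.sum.toNat + a.length + 1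

-- innermost loop: while k < len(a): if a[i] < a[k]: a[k] -= a[i] else: k += 1
def innerK : Nat → List Int → Nat → Nat → List Int
  | 0, a, _, _ => a
  | fuel+1, a, i, k =>
    if k < a.length then
      if a.getD i 0 < a.getD k 0 then
        innerK fuel (a.set k (a.getD k 0 - a.getD i 0)) i k
      else
        innerK fuel a i (k+1)
    else a

-- middle loop: while i < len(a) and not all_equal(a): <inner loop>; i += 1; k = 0
def middleI : Nat → List Int → Nat → List Int
  | 0, a, _ => a
  | fuel+1, a, i =>
    if i < a.length then
      if allEqual a then a
      else middleI fuel (innerK (innerFuel a) a i 0) (i+1)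
    else a

-- outer loop: while not all_equal(a): i = 0; k = 0; <middle loop>
def outer : Nat → List Int → List Int
  | 0, a => a
  | fuel+1, a => if allEqual a then a else outer fuel (middleI (a.length + 1) a 0)

def solution (a : List Int) : Int := (outer (a.sum.toNat + 1) a).sum

-- ===== PORT B =====
-- _gcd(g, x): while x: g, x = x, g % x  (Python %)
def euclid (g x : Int) : Int :=
  if x = 0 then g else euclid x (PySem.Int.mod g x)
termination_by x.natAbs
decreasing_by
  rename_i hx
  rcases lt_or_gt_of_ne hx with h | h
  · have := PySem.Int.mod_neg_bounds g h; omega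
  · have h1 := PySem.Int.mod_nonneg g h
    have h2 := PySem.Int.mod_lt g h
    omega

def solution_alt (a : List Int) : Int := (a.length : Int) * a.foldl euclid 0

-- ===== PRECONDITION & SPEC =====
-- Pre_ is exactly the set of inputs on which Python A terminates: all elements
-- positive, or all elements equal (on any other input the subtraction loop runs
-- forever, e.g. a nonpositive a[i] < a[k] never makes a[k] ≤ a[i]).
def Pre_solution (a : List Int) : Prop :=
  (∀ x ∈ a, 0 < x) ∨ (∀ x ∈ a, x = a.headD 0)
instance (a : List Int) : Decidable (Pre_solution a) := by unfold Pre_solution; infer_instance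

def pvWitness_solution : List Int := [6, 10, 4]

def Spec_solution (a : List Int) (out : Int) : Prop := out = solution_alt a
instance (a : List Int) (out : Int) : Decidable (Spec_solution a out) := by unfold Spec_solution; infer_instance

-- ===== CLAIM (what is proved, stated in full; the proofs are below) =====
def Claim_equal_solution : Prop := ∀ (a : List Int), Dom_solution a → Pre_solution a → Spec_solution a (solution a)

-- ===== LEMMAS AND PROOFS =====

-- common-divisor sets of two lists coincide
def Dinv (b a : List Int) : Prop := ∀ d : Int, (∀ x ∈ b, d ∣ x) ↔ (∀ x ∈ a, d ∣ x)

lemma Dinv_refl (a : List Int) : Dinv a a := fun _ => Iff.rfl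

lemma Dinv_trans {c b a : List Int} (h1 : Dinv c b) (h2 : Dinv b a) : Dinv c a :=
  fun d => (h1 d).trans (h2 d)

lemma getD_mem {a : List Int} {j : Nat} (h : j < a.length) : a.getD j 0 ∈ a := by
  rw [List.getD_eq_getElem _ _ h]; exact List.getElem_mem h

lemma sum_const : ∀ (a : List Int) (v : Int), (∀ x ∈ a, x = v) → a.sum = (a.length : Int) * v := by
  intro a
  induction a with
  | nil => intro v _; simp
  | cons x xs ih =>
    intro v h
    have hx : x = v := h x (List.mem_cons_self ..)
    have hxs := ih v (fun y hy => h y (List.mem_cons_of_mem _ hy))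
    simp only [List.sum_cons, hxs, hx, List.length_cons]
    push_cast
    ring

lemma allEqual_iff (a : List Int) : allEqual a = true ↔ ∀ x ∈ a, x = a.headD 0 := by
  cases a with
  | nil => simp [allEqual]
  | cons x xs =>
    simp only [allEqual, List.all_eq_true, beq_iff_eq, List.headD_cons]
    constructor
    · intro h y hy
      rcases List.mem_cons.mp hy with rfl | hy
      · rfl
      · exact (h y hy).symm
    · intro h y hy
      exact (h y (List.mem_cons_of_mem _ hy)).symm

lemma allEqual_of_le (a : List Int)
    (h : ∀ m, m < a.length → ∀ j, j < a.length → a.getD j 0 ≤ a.getD m 0) :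
    allEqual a = true := by
  rw [allEqual_iff]
  intro x hx
  cases a with
  | nil => simp at hx
  | cons y ys =>
    obtain ⟨j, hj, rfl⟩ := List.mem_iff_getElem.mp hx
    have h0 : 0 < (y :: ys).length := by simp
    have h1 := h j hj 0 h0
    have h2 := h 0 h0 j hj
    rw [List.getD_eq_getElem _ _ hj, List.getD_eq_getElem _ _ h0] at h1 h2
    simp only [List.headD_cons]
    have : (y :: ys)[0] = y := rfl
    rw [this] at h1 h2
    omega

-- euclid facts
lemma euclid_zero_right (g : Int) : euclid g 0 = g := by rw [euclid]; simp

lemma euclid_self (v : Int) : euclid v v = v := by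
  rw [euclid]
  by_cases hv : v = 0
  · simp [hv]
  · have : PySem.Int.mod v v = 0 := (PySem.Int.mod_eq_zero_iff_dvd v v).mpr dvd_rfl
    simp [hv, this, euclid_zero_right]

lemma euclid_zero_left (v : Int) : euclid 0 v = v := by
  rw [euclid]
  by_cases hv : v = 0
  · simp [hv]
  · have : PySem.Int.mod 0 v = 0 := (PySem.Int.mod_eq_zero_iff_dvd 0 v).mpr (dvd_zero v)
    simp [hv, this, euclid_zero_right]

lemma fold_const : ∀ (l : List Int) (v : Int), (∀ x ∈ l, x = v) → l.foldl euclid v = v := by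
  intro l
  induction l with
  | nil => intro v _; rfl
  | cons x xs ih =>
    intro v h
    have hx : x = v := h x (List.mem_cons_self ..)
    simp only [List.foldl_cons, hx, euclid_self]
    exact ih v (fun y hy => h y (List.mem_cons_of_mem _ hy))

lemma euclid_dvd_iff (g x d : Int) : d ∣ euclid g x ↔ d ∣ g ∧ d ∣ x := by
  rw [euclid]
  by_cases hx : x = 0
  · simp [hx]
  · simp only [if_neg hx]
    rw [euclid_dvd_iff x (PySem.Int.mod g x) d]
    have hmod : PySem.Int.mod g x = g - PySem.Int.floordiv g x * x := by
      have := PySem.Int.floordiv_mul_add_mod g x; linarith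
    constructor
    · rintro ⟨hdx, hdm⟩
      refine ⟨?_, hdx⟩
      have : g = PySem.Int.floordiv g x * x + PySem.Int.mod g x :=
        (PySem.Int.floordiv_mul_add_mod g x).symm
      rw [this]
      exact dvd_add (Dvd.dvd.mul_left hdx _) hdm
    · rintro ⟨hdg, hdx⟩
      refine ⟨hdx, ?_⟩
      rw [hmod]
      exact dvd_sub hdg (Dvd.dvd.mul_left hdx _)
termination_by x.natAbs
decreasing_by
  rcases lt_or_gt_of_ne hx with h | h
  · have := PySem.Int.mod_neg_bounds g h; omega
  · have h1 := PySem.Int.mod_nonneg g h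
    have h2 := PySem.Int.mod_lt g h
    omega

lemma fold_dvd_iff : ∀ (l : List Int) (g d : Int),
    d ∣ l.foldl euclid g ↔ d ∣ g ∧ ∀ x ∈ l, d ∣ x := by
  intro l
  induction l with
  | nil => intro g d; simp
  | cons x xs ih =>
    intro g d
    simp only [List.foldl_cons, ih, euclid_dvd_iff, List.mem_cons]
    constructor
    · rintro ⟨⟨h1, h2⟩, h3⟩
      exact ⟨h1, fun y hy => by rcases hy with rfl | hy; exact h2; exact h3 y hy⟩
    · rintro ⟨h1, h2⟩
      exact ⟨⟨h1, h2 x (Or.inl rfl)⟩, fun y hy => h2 y (Or.inr hy)⟩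

lemma euclid_pos (g x : Int) (_hg : 0 ≤ g) (hx : 0 < x) : 0 < euclid g x := by
  rw [euclid]
  have hx0 : ¬ x = 0 := by omega
  simp only [if_neg hx0]
  have hm := PySem.Int.mod_nonneg g hx
  have hmlt := PySem.Int.mod_lt g hx
  by_cases h0 : PySem.Int.mod g x = 0
  · rw [h0, euclid_zero_right]; exact hx
  · exact euclid_pos x (PySem.Int.mod g x) (le_of_lt hx) (by omega)
termination_by x.natAbs
decreasing_by omega

lemma fold_pos : ∀ (l : List Int) (g : Int), 0 < g → (∀ x ∈ l, 0 < x) → 0 < l.foldl euclid g := by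
  intro l
  induction l with
  | nil => intro g hg _; exact hg
  | cons x xs ih =>
    intro g hg h
    simp only [List.foldl_cons]
    exact ih _ (euclid_pos g x (le_of_lt hg) (h x (List.mem_cons_self ..)))
      (fun y hy => h y (List.mem_cons_of_mem _ hy))

-- ===== A-side loop invariants =====

lemma inner_spec : ∀ (f : Nat) (a : List Int) (i k : Nat),
    (∀ x ∈ a, 0 < x) → i < a.length →
    (∀ j, j < k → j < a.length → a.getD j 0 ≤ a.getD i 0) →
    a.sum.toNat + (a.length - k) < f →
    (innerK f a i k).length = a.length ∧
    (∀ x ∈ innerK f a i k, 0 < x) ∧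
    Dinv (innerK f a i k) a ∧
    (innerK f a i k).getD i 0 = a.getD i 0 ∧
    (innerK f a i k = a ∨ (innerK f a i k).sum < a.sum) ∧
    (∀ j, j < a.length → (innerK f a i k).getD j 0 ≤ (innerK f a i k).getD i 0) := by
  intro f
  induction f with
  | zero => intro a i k _ _ _ hf; omega
  | succ f ih =>
    intro a i k hpos hi hpre hf
    by_cases hk : k < a.length
    · by_cases hlt : a.getD i 0 < a.getD k 0
      · -- subtraction step
        have hik : i ≠ k := by intro h; rw [h] at hlt; omega
        set ai := a.getD i 0 with hai
        set ak := a.getD k 0 with hak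
        set a2 := a.set k (ak - ai) with ha2
        have hlen2 : a2.length = a.length := List.length_set ..
        have hk2 : k < a2.length := by omega
        have hi2 : i < a2.length := by omega
        have hgetk : a2.getD k 0 = ak - ai := by
          rw [List.getD_eq_getElem _ _ hk2]; exact List.getElem_set_self _
        have hgetne : ∀ j, j ≠ k → j < a.length → a2.getD j 0 = a.getD j 0 := by
          intro j hj hjl
          have hj2 : j < a2.length := by omega
          rw [List.getD_eq_getElem _ _ hj2, List.getD_eq_getElem _ _ hjl]
          exact List.getElem_set_ne (fun h => hj h.symm) _
        have hgeti : a2.getD i 0 = ai := hgetne i hik hi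
        have hai_pos : 0 < ai := hpos _ (getD_mem hi)
        have hpos2 : ∀ x ∈ a2, 0 < x := by
          intro x hx
          rcases List.mem_or_eq_of_mem_set hx with hx | rfl
          · exact hpos x hx
          · omega
        have hdinv2 : Dinv a2 a := by
          intro d
          constructor
          · intro h x hx
            obtain ⟨j, hj, rfl⟩ := List.mem_iff_getElem.mp hx
            by_cases hjk : j = k
            · subst hjk
              have h1 : d ∣ (ak - ai) := by
                have := h _ (getD_mem hk2); rwa [hgetk] at this
              have h2 : d ∣ ai := by
                have := h _ (getD_mem hi2); rwa [hgeti] at this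
              have : a[j] = ak := by rw [hak, List.getD_eq_getElem _ _ hj]
              rw [this]
              have := dvd_add h1 h2
              simpa using this
            · have heq : a2.getD j 0 = a[j] := by
                rw [hgetne j hjk hj, List.getD_eq_getElem _ _ hj]
              have := h _ (getD_mem (by omega : j < a2.length))
              rwa [heq] at this
          · intro h x hx
            rcases List.mem_or_eq_of_mem_set hx with hx | rfl
            · exact h x hx
            · exact dvd_sub (h _ (getD_mem hk)) (h _ (getD_mem hi))
        have hsum2 : a2.sum = a.sum - ai := by
          have := List.sum_set' a k (ak - ai)
          rw [ha2, this]
          rw [dif_pos hk]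
          have : a[k] = ak := by rw [hak, List.getD_eq_getElem _ _ hk]
          rw [this]; ring
        have hsumA : 0 ≤ a.sum := List.sum_nonneg (fun x hx => le_of_lt (hpos x hx))
        have hsum2' : 0 ≤ a2.sum := List.sum_nonneg (fun x hx => le_of_lt (hpos2 x hx))
        have hpre2 : ∀ j, j < k → j < a2.length → a2.getD j 0 ≤ a2.getD i 0 := by
          intro j hj hjl
          rw [hgetne j (by omega) (by omega), hgeti]
          exact hpre j hj (by omega)
        have hf2 : a2.sum.toNat + (a2.length - k) < f := by
          rw [hlen2]; omega
        have H := ih a2 i k hpos2 hi2 hpre2 hf2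
        obtain ⟨H1, H2, H3, H4, H5, H6⟩ := H
        have hstep : innerK (f+1) a i k = innerK f a2 i k := by
          rw [innerK]; rw [if_pos hk, if_pos hlt]
        rw [hstep]
        refine ⟨by omega, H2, Dinv_trans H3 hdinv2, by rw [H4, hgeti], ?_, ?_⟩
        · right
          rcases H5 with h | h
          · rw [h]; omega
          · omega
        · intro j hj
          exact H6 j (by omega)
      · -- k += 1 step
        have hpre2 : ∀ j, j < k + 1 → j < a.length → a.getD j 0 ≤ a.getD i 0 := by
          intro j hj hjl
          rcases Nat.lt_or_ge j k with h | h
          · exact hpre j h hjl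
          · have : j = k := by omega
            subst this; omega
        have hf2 : a.sum.toNat + (a.length - (k+1)) < f := by omega
        have H := ih a i (k+1) hpos hi hpre2 hf2
        have hstep : innerK (f+1) a i k = innerK f a i (k+1) := by
          rw [innerK]; rw [if_pos hk, if_neg hlt]
        rw [hstep]
        exact H
    · -- loop exit
      have hstep : innerK (f+1) a i k = a := by
        rw [innerK]; rw [if_neg hk]
      rw [hstep]
      exact ⟨rfl, hpos, Dinv_refl a, rfl, Or.inl rfl,
        fun j hj => hpre j (by omega) hj⟩

lemma middle_spec : ∀ (f : Nat) (a : List Int) (i : Nat),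
    (∀ x ∈ a, 0 < x) → a.length - i < f →
    (middleI f a i).length = a.length ∧
    (∀ x ∈ middleI f a i, 0 < x) ∧
    Dinv (middleI f a i) a ∧
    (middleI f a i = a ∨ (middleI f a i).sum < a.sum) ∧
    (middleI f a i = a →
      (allEqual a = true ∨
        ∀ m, i ≤ m → m < a.length → ∀ j, j < a.length → a.getD j 0 ≤ a.getD m 0)) := by
  intro f
  induction f with
  | zero => intro a i _ hf; omega
  | succ f ih =>
    intro a i hpos hf
    by_cases hi : i < a.length
    · by_cases hEq : allEqual a = true
      · have hstep : middleI (f+1) a i = a := by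
          rw [middleI]; rw [if_pos hi, if_pos hEq]
        rw [hstep]
        exact ⟨rfl, hpos, Dinv_refl a, Or.inl rfl, fun _ => Or.inl hEq⟩
      · set a1 := innerK (innerFuel a) a i 0 with ha1
        have hfin : a.sum.toNat + (a.length - 0) < innerFuel a := by
          unfold innerFuel; omega
        have I := inner_spec (innerFuel a) a i 0 hpos hi (by omega) hfin
        rw [← ha1] at I
        obtain ⟨I1, I2, I3, I4, I5, I6⟩ := I
        have hf1 : a1.length - (i+1) < f := by omega
        have M := ih a1 (i+1) I2 hf1
        obtain ⟨M1, M2, M3, M4, M5⟩ := M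
        have hstep : middleI (f+1) a i = middleI f a1 (i+1) := by
          rw [middleI]
          rw [if_pos hi, if_neg (by simp [hEq])]
        rw [hstep]
        refine ⟨by omega, M2, Dinv_trans M3 I3, ?_, ?_⟩
        · rcases M4 with h | h
          · rw [h]; exact I5
          · right
            rcases I5 with h2 | h2
            · rw [h2] at h; rw [h2]; exact h
            · omega
        · intro hr
          -- middleI f a1 (i+1) = a forces a1 = a
          have hsum_r : (middleI f a1 (i+1)).sum = a.sum := by rw [hr]
          have ha1a : a1 = a := by
            rcases I5 with h | h
            · exact h
            · exfalso
              rcases M4 with h2 | h2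
              · rw [h2] at hr; rw [hr] at h; omega
              · omega
          right
          rw [ha1a] at I6 M5 hr
          intro m him hm j hj
          rcases Nat.lt_or_ge m (i+1) with hmi | hmi
          · have : m = i := by omega
            subst this
            exact I6 j hj
          · rcases M5 hr with h | h
            · exact absurd h hEq
            · exact h m hmi hm j hj
    · have hstep : middleI (f+1) a i = a := by
        rw [middleI]; rw [if_neg hi]
      rw [hstep]
      exact ⟨rfl, hpos, Dinv_refl a, Or.inl rfl,
        fun _ => Or.inr (fun m him hm j hj => absurd hm (by omega))⟩

lemma outer_spec : ∀ (f : Nat) (a : List Int),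
    (∀ x ∈ a, 0 < x) → a.sum.toNat < f →
    (outer f a).length = a.length ∧
    (∀ x ∈ outer f a, 0 < x) ∧
    Dinv (outer f a) a ∧
    allEqual (outer f a) = true := by
  intro f
  induction f with
  | zero => intro a _ hf; omega
  | succ f ih =>
    intro a hpos hf
    by_cases hEq : allEqual a = true
    · have hstep : outer (f+1) a = a := by rw [outer]; rw [if_pos hEq]
      rw [hstep]
      exact ⟨rfl, hpos, Dinv_refl a, hEq⟩
    · set a1 := middleI (a.length + 1) a 0 with ha1
      have M := middle_spec (a.length + 1) a 0 hpos (by omega)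
      rw [← ha1] at M
      obtain ⟨M1, M2, M3, M4, M5⟩ := M
      have hsumA : 0 ≤ a.sum := List.sum_nonneg (fun x hx => le_of_lt (hpos x hx))
      have hsum1 : 0 ≤ a1.sum := List.sum_nonneg (fun x hx => le_of_lt (M2 x hx))
      have hlt : a1.sum < a.sum := by
        rcases M4 with h | h
        · exfalso
          rcases M5 h with h2 | h2
          · exact hEq h2
          · exact hEq (allEqual_of_le a (fun m hm j hj => h2 m (by omega) hm j hj))
        · exact h
      have hf1 : a1.sum.toNat < f := by omega
      have H := ih a1 M2 hf1
      obtain ⟨H1, H2, H3, H4⟩ := H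
      have hstep : outer (f+1) a = outer f a1 := by
        rw [outer]; rw [if_neg (by simp [hEq])]
      rw [hstep]
      exact ⟨by omega, H2, Dinv_trans H3 M3, H4⟩

-- ===== VERDICT (by name: the statement is the Claim_ definition above) =====
theorem solution_spec : Claim_equal_solution := by
  unfold Claim_equal_solution
  intro a _ hpre
  unfold Spec_solution solution solution_alt
  rcases hpre with hpos | hconst
  · cases a with
    | nil => rfl
    | cons x xs =>
      set a := x :: xs with ha
      have H := outer_spec (a.sum.toNat + 1) a hpos (by omega)
      obtain ⟨hlen, hpos', hdinv, heqb⟩ := H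
      set b := outer (a.sum.toNat + 1) a with hb
      have hbne : b ≠ [] := by
        intro h
        rw [h] at hlen
        simp [ha] at hlen
      obtain ⟨z, zs, hbzs⟩ := List.exists_cons_of_ne_nil hbne
      have hhead : b.headD 0 = z := by rw [hbzs]; rfl
      set v := b.headD 0 with hv
      have hvall : ∀ y ∈ b, y = v := (allEqual_iff b).mp heqb
      have hvmem : v ∈ b := by
        rw [hhead, hbzs]; exact List.mem_cons_self ..
      have hv0 : 0 < v := hpos' v hvmem
      have hsumb : b.sum = (b.length : Int) * v := sum_const b v hvall
      set g := a.foldl euclid 0 with hg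
      have hg0 : 0 < g := by
        rw [hg, ha, List.foldl_cons, euclid_zero_left]
        exact fold_pos xs x (hpos x (by simp [ha])) (fun y hy => hpos y (by simp [ha, hy]))
      have hdg : ∀ d : Int, d ∣ g ↔ ∀ y ∈ a, d ∣ y := by
        intro d
        rw [hg, fold_dvd_iff]
        simp
      have hdv : ∀ d : Int, d ∣ v ↔ ∀ y ∈ b, d ∣ y := by
        intro d
        constructor
        · intro h y hy; rw [hvall y hy]; exact h
        · intro h; exact h v hvmem
      have hveq : v = g := by
        apply Int.dvd_antisymm (le_of_lt hv0) (le_of_lt hg0)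
        · exact (hdg v).mpr ((hdinv v).mp ((hdv v).mp dvd_rfl))
        · exact (hdv g).mpr ((hdinv g).mpr ((hdg g).mp dvd_rfl))
      rw [hsumb, hveq, hlen]
  · have hEq : allEqual a = true := (allEqual_iff a).mpr hconst
    have hstep : outer (a.sum.toNat + 1) a = a := by rw [outer]; rw [if_pos hEq]
    rw [hstep]
    rw [sum_const a (a.headD 0) hconst]
    congr 1
    cases a with
    | nil => rfl
    | cons x xs =>
      simp only [List.headD_cons] at *
      rw [List.foldl_cons, euclid_zero_left]
      have hx : x = (x :: xs).headD 0 := by simp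
      exact (fold_const xs x (fun y hy => by
        have := hconst y (List.mem_cons_of_mem _ hy); simpa using this)).symm
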